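-- pv_equiv track=rewrite | github.com/minhtu-nguyen/coding-practice | educative/DP.py | count_ways_rec
-- ===== SOURCE A (Python) =====
-- def count_ways_rec(n, memo):
--
--     # Setting up our base cases
--     # We can not get a negative target number at any point,
--     # so we return 0 for negative values
--     if n < 0:
--         return 0
--
--     # There is only 1 way to reach a target number of 0,
--     # by not using any available numbers
--     if n == 0:
--         return 1
--
--     if memo[n] == -1:
--         # Recursively calculate the number of ways using the
--         # recurrence relation and store in memo
--         memo[n] = count_ways_rec(n - 1, memo) + count_ways_rec(n - 3, memo) + count_ways_rec(n - 4, memo)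
--
--     return memo[n]
-- ===== SOURCE B (Python) =====
-- def _v(memo, j):
--     # value of an already-settled slot: 0 below zero, 1 at zero, else the table entry
--     if j < 0:
--         return 0
--     if j == 0:
--         return 1
--     return memo[j]
--
--
-- def count_ways_rec(n, memo):
--     # Bottom-up tabulation instead of top-down memoized recursion.
--     # Like the original, mutates memo in place (it may fill -1 slots the
--     # recursion would not have visited); return-value equivalence is what
--     # is claimed.
--     if n < 0:
--         return 0
--     if n == 0:
--         return 1
--     if memo[n] != -1:
--         return memo[n]
--     for i in range(1, n + 1):
--         if memo[i] == -1:
--             memo[i] = _v(memo, i - 1) + _v(memo, i - 3) + _v(memo, i - 4)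
--     return memo[n]
-- ===== Notes on version B (the rewrite author's own statement) =====
-- stated objective: alternative
-- what changed: Top-down memoized recursion replaced by an iterative bottom-up tabulation loop (i from 1 to n) that fills only the -1 slots; no recursion at all, so no recursion-depth limit.
import Mathlib
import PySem

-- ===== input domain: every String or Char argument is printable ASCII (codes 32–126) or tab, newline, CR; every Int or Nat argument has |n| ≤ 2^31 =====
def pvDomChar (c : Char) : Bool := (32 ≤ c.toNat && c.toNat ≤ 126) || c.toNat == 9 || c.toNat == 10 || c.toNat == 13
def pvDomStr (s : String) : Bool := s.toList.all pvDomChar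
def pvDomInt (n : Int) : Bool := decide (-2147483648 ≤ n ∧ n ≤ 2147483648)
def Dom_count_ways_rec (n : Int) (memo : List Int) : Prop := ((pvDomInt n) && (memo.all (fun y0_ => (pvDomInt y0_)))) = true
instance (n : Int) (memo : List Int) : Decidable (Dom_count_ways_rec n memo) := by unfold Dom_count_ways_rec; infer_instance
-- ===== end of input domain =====

-- B replaces A's top-down memoized recursion by an iterative bottom-up tabulation;
-- both mutate the Python memo argument (B may fill -1 slots A's recursion skips):
-- the equivalence proved here is about the RETURN value only.

-- ===== PORT A =====
-- state-passing port of A's mutating recursion: returns (return value, final memo)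
def countWaysA (n : Int) (memo : List Int) : Int × List Int :=
  if n < 0 then (0, memo)
  else if n = 0 then (1, memo)
  else
    match PySem.List.pyGet? memo n with
    | none => (0, memo)   -- Python raises IndexError here; excluded by Pre_
    | some c =>
      if c = -1 then
        let r1 := countWaysA (n - 1) memo
        let r3 := countWaysA (n - 3) r1.2
        let r4 := countWaysA (n - 4) r3.2
        let m' := PySem.List.pySetD r4.2 n (r1.1 + r3.1 + r4.1)
        ((PySem.List.pyGet? m' n).getD 0, m')
      else (c, memo)
termination_by n.toNat
decreasing_by all_goals omega

def count_ways_rec (n : Int) (memo : List Int) : Int := (countWaysA n memo).1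

-- ===== PORT B =====
-- helper _v of Source B
def bV (memo : List Int) (j : Int) : Int :=
  if j < 0 then 0
  else if j = 0 then 1
  else (PySem.List.pyGet? memo j).getD 0

-- the body of Source B's for-loop
def bStep (m : List Int) (i : Int) : List Int :=
  if (PySem.List.pyGet? m i).getD 0 = -1 then
    PySem.List.pySetD m i (bV m (i - 1) + bV m (i - 3) + bV m (i - 4))
  else m

def count_ways_rec_alt (n : Int) (memo : List Int) : Int :=
  if n < 0 then 0
  else if n = 0 then 1
  else
    match PySem.List.pyGet? memo n with
    | none => 0   -- Python raises IndexError here; excluded by Pre_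
    | some c =>
      if c ≠ -1 then c
      else
        let final := (PySem.List.pyRange 1 (n + 1) 1).foldl bStep memo
        (PySem.List.pyGet? final n).getD 0

-- ===== PRECONDITION & SPEC =====
-- Pre_ excludes exactly the inputs where Python A raises IndexError: 1 ≤ n with n ≥ len(memo).
def Pre_count_ways_rec (n : Int) (memo : List Int) : Prop := 1 ≤ n → n < (memo.length : Int)
instance (n : Int) (memo : List Int) : Decidable (Pre_count_ways_rec n memo) := by
  unfold Pre_count_ways_rec; infer_instance

def pvWitness_count_ways_rec : Int × List Int := (4, [-1, -1, -1, -1, -1])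

def Spec_count_ways_rec (n : Int) (memo : List Int) (out : Int) : Prop := out = count_ways_rec_alt n memo
instance (n : Int) (memo : List Int) (out : Int) : Decidable (Spec_count_ways_rec n memo out) := by
  unfold Spec_count_ways_rec; infer_instance

-- ===== CLAIM (what is proved, stated in full; the proofs are below) =====
def Claim_equal_count_ways_rec : Prop := ∀ (n : Int) (memo : List Int), Dom_count_ways_rec n memo → Pre_count_ways_rec n memo → Spec_count_ways_rec n memo (count_ways_rec n memo)

-- ===== LEMMAS AND PROOFS =====

-- the pure value both programs compute: recurrence over the ORIGINAL memo, -1 = uncached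
def pv (memo : List Int) (j : Int) : Int :=
  if j < 0 then 0
  else if j = 0 then 1
  else
    let c := memo.getD j.toNat 0
    if c = -1 then pv memo (j - 1) + pv memo (j - 3) + pv memo (j - 4)
    else c
termination_by j.toNat
decreasing_by all_goals omega

lemma pv_neg (memo : List Int) (j : Int) (h : j < 0) : pv memo j = 0 := by
  rw [pv]; simp [h]

lemma pv_zero (memo : List Int) : pv memo 0 = 1 := by
  rw [pv]; simp

lemma pv_pos (memo : List Int) (j : Int) (h : 1 ≤ j) :
    pv memo j = if memo.getD j.toNat 0 = -1
      then pv memo (j - 1) + pv memo (j - 3) + pv memo (j - 4)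
      else memo.getD j.toNat 0 := by
  rw [pv]
  have h1 : ¬ j < 0 := by omega
  have h2 : ¬ j = 0 := by omega
  simp only [h1, if_false, h2]

lemma pyGet?_getD_eq (m : List Int) (j : Int) (h0 : 0 ≤ j) :
    (PySem.List.pyGet? m j).getD 0 = m.getD j.toNat 0 := by
  rw [PySem.List.pyGet?_of_nonneg m h0, List.getD_eq_getElem?_getD]

lemma pyGet?_some (m : List Int) (j : Int) (h0 : 0 ≤ j) (h1 : j < (m.length : Int)) :
    PySem.List.pyGet? m j = some (m.getD j.toNat 0) := by
  rw [PySem.List.pyGet?_of_nonneg m h0, List.getD_eq_getElem?_getD,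
    List.getElem?_eq_getElem (by omega)]
  simp

-- consistency of an intermediate memo m with the original memo
def Cons (memo m : List Int) : Prop :=
  m.length = memo.length ∧
  ∀ j : Nat, m.getD j 0 = memo.getD j 0 ∨ (memo.getD j 0 = -1 ∧ m.getD j 0 = pv memo (j : Int))

lemma cons_refl (memo : List Int) : Cons memo memo :=
  ⟨rfl, fun _ => Or.inl rfl⟩

lemma cons_val (memo m : List Int) (hc : Cons memo m) (j : Int) (h1 : 1 ≤ j)
    (hne : m.getD j.toNat 0 ≠ -1) : m.getD j.toNat 0 = pv memo j := by
  rcases hc.2 j.toNat with h | ⟨_, h⟩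
  · rw [h] at hne ⊢
    rw [pv_pos memo j h1, if_neg hne]
  · rw [h]; congr 1; omega

-- main A-side lemma: from any consistent memo, countWaysA returns pv and stays consistent
lemma countWaysA_ok (memo : List Int) :
    ∀ (N : Nat) (n : Int), n.toNat ≤ N → n < (memo.length : Int) →
    ∀ m, Cons memo m → (countWaysA n m).1 = pv memo n ∧ Cons memo (countWaysA n m).2 := by
  intro N
  induction N with
  | zero =>
    intro n hN hlen m hc
    rw [countWaysA]
    by_cases h0 : n < 0
    · simp [h0, pv_neg memo n h0, hc]
    · have : n = 0 := by omega
      subst this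
      simp [pv_zero, hc]
  | succ N ih =>
    intro n hN hlen m hc
    rw [countWaysA]
    by_cases h0 : n < 0
    · simp [h0, pv_neg memo n h0, hc]
    by_cases h1 : n = 0
    · subst h1; simp [pv_zero, hc]
    have hpos : 1 ≤ n := by omega
    have hlen' : n < (m.length : Int) := by rw [hc.1]; exact hlen
    rw [pyGet?_some m n (by omega) hlen']
    simp only [h0, if_false, h1]
    by_cases hm : m.getD n.toNat 0 = -1
    · -- uncached: recurse
      rw [if_pos hm]
      have hmemo : memo.getD n.toNat 0 = -1 := by
        rcases hc.2 n.toNat with h | ⟨h, _⟩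
        · rw [← h]; exact hm
        · exact h
      have r1 := ih (n - 1) (by omega) (by omega) m hc
      have r3 := ih (n - 3) (by omega) (by omega) _ r1.2
      have r4 := ih (n - 4) (by omega) (by omega) _ r3.2
      set m3 := (countWaysA (n - 4) (countWaysA (n - 3) (countWaysA (n - 1) m).2).2).2 with hm3
      have hsum : (countWaysA (n - 1) m).1 + (countWaysA (n - 3) (countWaysA (n - 1) m).2).1
          + (countWaysA (n - 4) (countWaysA (n - 3) (countWaysA (n - 1) m).2).2).1 = pv memo n := by
        rw [r1.1, r3.1, r4.1, pv_pos memo n hpos, if_pos hmemo]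
      have hlen3 : m3.length = memo.length := r4.2.1
      have hset : PySem.List.pySetD m3 n (pv memo n) = m3.set n.toNat (pv memo n) :=
        PySem.List.pySetD_of_nonneg m3 _ (by omega)
      have hconsSet : Cons memo (m3.set n.toNat (pv memo n)) := by
      -- length + slotwise consistency after the write
        refine ⟨by simp [hlen3], ?_⟩
        intro j
        by_cases hj : j = n.toNat
        · subst hj
          right
          refine ⟨hmemo, ?_⟩
          rw [List.getD_eq_getElem?_getD, List.getElem?_set_self (by omega)]
          simp only [Option.getD_some]
          congr 1; omega
        · have heq : (m3.set n.toNat (pv memo n)).getD j 0 = m3.getD j 0 := by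
            rw [List.getD_eq_getElem?_getD, List.getD_eq_getElem?_getD,
              List.getElem?_set_ne (by omega)]
          rw [heq]
          exact r4.2.2 j
      constructor
      · rw [hsum, hset]
        have : PySem.List.pyGet? (m3.set n.toNat (pv memo n)) n = some (pv memo n) := by
          rw [PySem.List.pyGet?_of_nonneg _ (by omega : (0:Int) ≤ n),
            List.getElem?_set_self (by omega)]
        simp [this]
      · rw [hsum, hset]; exact hconsSet
    · -- cached: return the stored value, memo unchanged
      rw [if_neg hm]
      exact ⟨cons_val memo m hc n hpos hm, hc⟩

-- B-side loop invariant: slots 1..k-1 hold pv, all other slots untouched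
def LInv (memo : List Int) (k : Int) (m : List Int) : Prop :=
  m.length = memo.length ∧
  (∀ j : Nat, 1 ≤ j → (j : Int) < k → j < memo.length → m.getD j 0 = pv memo (j : Int)) ∧
  (∀ j : Nat, ¬ (1 ≤ j ∧ (j : Int) < k) → m.getD j 0 = memo.getD j 0)

lemma bV_pv (memo m : List Int) (k : Int) (hInv : LInv memo k m) (j : Int)
    (hjk : j < k) (hjlen : j < (memo.length : Int)) : bV m j = pv memo j := by
  unfold bV
  by_cases h0 : j < 0
  · rw [pv_neg memo j h0]; simp [h0]
  by_cases h1 : j = 0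
  · subst h1; simp [pv_zero]
  · have hj1 : 1 ≤ j := by omega
    rw [if_neg h0, if_neg h1, pyGet?_getD_eq m j (by omega)]
    have := hInv.2.1 j.toNat (by omega) (by omega) (by omega)
    rw [this]
    congr 1; omega

lemma bStep_inv (memo m : List Int) (i : Int) (hi : 1 ≤ i) (hilen : i < (memo.length : Int))
    (hInv : LInv memo i m) : LInv memo (i + 1) (bStep m i) := by
  unfold bStep
  rw [pyGet?_getD_eq m i (by omega)]
  have hmi : m.getD i.toNat 0 = memo.getD i.toNat 0 := hInv.2.2 i.toNat (by omega)
  by_cases hc : m.getD i.toNat 0 = -1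
  · rw [if_pos hc]
    have hv : bV m (i - 1) + bV m (i - 3) + bV m (i - 4) = pv memo i := by
      rw [bV_pv memo m i hInv (i-1) (by omega) (by omega),
          bV_pv memo m i hInv (i-3) (by omega) (by omega),
          bV_pv memo m i hInv (i-4) (by omega) (by omega),
          pv_pos memo i hi, if_pos (hmi ▸ hc)]
    rw [hv, PySem.List.pySetD_of_nonneg m _ (by omega : (0:Int) ≤ i)]
    have hlen : i.toNat < m.length := by rw [hInv.1]; omega
    refine ⟨by simp [hInv.1], ?_, ?_⟩
    · intro j hj1 hjk hjlen
      by_cases hj : j = i.toNat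
      · subst hj
        rw [List.getD_eq_getElem?_getD, List.getElem?_set_self hlen]
        simp only [Option.getD_some]
        congr 1; omega
      · rw [List.getD_eq_getElem?_getD, List.getElem?_set_ne (by omega),
          ← List.getD_eq_getElem?_getD]
        exact hInv.2.1 j hj1 (by omega) hjlen
    · intro j hj
      rw [List.getD_eq_getElem?_getD, List.getElem?_set_ne (by omega),
        ← List.getD_eq_getElem?_getD]
      exact hInv.2.2 j (by omega)
  · rw [if_neg hc]
    refine ⟨hInv.1, ?_, ?_⟩
    · intro j hj1 hjk hjlen
      by_cases hj : (j : Int) = i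
      · have hji : j = i.toNat := by omega
        subst hji
        have hne : memo.getD i.toNat 0 ≠ -1 := by rw [← hmi]; exact hc
        have hcast : ((i.toNat : Nat) : Int) = i := by omega
        rw [hcast, pv_pos memo i hi, if_neg hne]
        exact hmi
      · exact hInv.2.1 j hj1 (by omega) hjlen
    · intro j hj
      exact hInv.2.2 j (by omega)

lemma foldl_inv (memo : List Int) (b : Int) (hble : b ≤ (memo.length : Int)) :
    ∀ (K : Nat) (a : Int), (b - a).toNat ≤ K → 1 ≤ a →
    ∀ m, LInv memo a m → LInv memo (max a b) ((PySem.List.pyRange a b 1).foldl bStep m) := by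
  intro K
  induction K with
  | zero =>
    intro a hK ha m hInv
    have hba : b ≤ a := by omega
    rw [PySem.List.pyRange_one_eq_nil hba]
    simpa [max_eq_left hba] using hInv
  | succ K ih =>
    intro a hK ha m hInv
    by_cases hba : b ≤ a
    · rw [PySem.List.pyRange_one_eq_nil hba]
      simpa [max_eq_left hba] using hInv
    · have hab : a < b := by omega
      rw [PySem.List.pyRange_one_cons hab, List.foldl_cons]
      have h1 := bStep_inv memo m a ha (by omega) hInv
      have := ih (a + 1) (by omega) (by omega) _ h1
      rw [max_eq_right (by omega : a + 1 ≤ b)] at this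
      rw [max_eq_right (by omega : a ≤ b)]
      exact this

lemma inv_init (memo : List Int) : LInv memo 1 memo := by
  refine ⟨rfl, ?_, fun j _ => rfl⟩
  intro j hj1 hjk _
  omega

-- ===== VERDICT (by name: the statement is the Claim_ definition above) =====
theorem count_ways_rec_spec : Claim_equal_count_ways_rec := by
  intro n memo _ hpre
  unfold Spec_count_ways_rec count_ways_rec count_ways_rec_alt
  by_cases h0 : n < 0
  · rw [countWaysA]; simp [h0]
  by_cases h1 : n = 0
  · subst h1; rw [countWaysA]; simp
  have hpos : 1 ≤ n := by omega
  have hlen : n < (memo.length : Int) := hpre hpos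
  have hA := (countWaysA_ok memo n.toNat n le_rfl hlen memo (cons_refl memo)).1
  rw [pyGet?_some memo n (by omega) hlen]
  simp only [h0, if_false, h1]
  by_cases hc : memo.getD n.toNat 0 = -1
  · simp only [hc, ne_eq, not_true_eq_false, if_false]
    rw [hA]
    have hfold := foldl_inv memo (n + 1) (by omega) (n + 1 - 1).toNat 1 (by omega) le_rfl
      memo (inv_init memo)
    rw [max_eq_right (by omega)] at hfold
    have hf : ((PySem.List.pyRange 1 (n + 1) 1).foldl bStep memo).getD n.toNat 0 = pv memo n := by
      have := hfold.2.1 n.toNat (by omega) (by omega) (by omega)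
      rw [this]; congr 1; omega
    rw [pyGet?_getD_eq _ n (by omega), hf]
  · simp only [hc, ne_eq, not_false_eq_true, if_true]
    rw [hA, pv_pos memo n hpos, if_neg hc]
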